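-- pv_equiv track=rewrite | github.com/hannazykava99/Python_for_DQE | HW_module_4_part_1.py | create_lists_with_keys
-- ===== SOURCE A (Python) =====
-- def create_lists_with_keys(lst):
--     distinct_keys = []  # create an empty list of distinct letters from all dictionaries in our list
--     duplicated_keys = []  # create an empty list of distinct letters which have duplicates (when the same letter occurs in at least two dictionaries)
--     for d in lst:  # go through each dictionary
--         for key in d:  # go through each key in specified dictionary
--             if key not in distinct_keys:  # check whether we already have the specified key in "distinct_keys" list
--                 distinct_keys.append(key)  # populate this list with each letter only once
--             elif key not in duplicated_keys:  # if we have duplicated key we should populate...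
--                 duplicated_keys.append(key)  # ... "duplicated_keys" list only once
--     distinct_keys.sort()  # sort "distinct_keys" list in alphabetical order
--     duplicated_keys.sort()  # sort "duplicated_keys" list in alphabetical order
--     return distinct_keys, duplicated_keys
-- ===== SOURCE B (Python) =====
-- def create_lists_with_keys(lst):
--     # Count in how many dicts each key occurs (keys are unique within one dict),
--     # then derive both lists from the frequency table.
--     counts = {}
--     for d in lst:
--         for key in d:
--             counts[key] = counts.get(key, 0) + 1
--     return sorted(counts), sorted(k for k, c in counts.items() if c >= 2)
-- ===== Notes on version B (the rewrite author's own statement) =====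
-- stated objective: idiomatic
-- what changed: Replaces A's two-list membership branching (with repeated linear 'in' scans) by a single frequency dict built in one pass, from which distinct = sorted(keys) and duplicated = sorted(keys with count >= 2) are derived by a count filter.
import Mathlib
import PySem

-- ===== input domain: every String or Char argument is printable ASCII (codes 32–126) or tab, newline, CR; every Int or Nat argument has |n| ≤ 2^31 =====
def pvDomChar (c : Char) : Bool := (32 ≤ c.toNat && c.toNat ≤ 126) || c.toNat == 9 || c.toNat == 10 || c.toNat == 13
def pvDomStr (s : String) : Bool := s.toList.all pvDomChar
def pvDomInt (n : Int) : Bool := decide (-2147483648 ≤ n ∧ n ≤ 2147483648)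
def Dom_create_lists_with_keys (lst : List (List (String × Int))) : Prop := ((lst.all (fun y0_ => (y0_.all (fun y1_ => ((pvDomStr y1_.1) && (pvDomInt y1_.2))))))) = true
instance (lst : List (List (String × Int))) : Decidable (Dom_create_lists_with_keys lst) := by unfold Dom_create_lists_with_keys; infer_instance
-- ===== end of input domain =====

-- ===== PORT A =====
-- B replaces A's two-list membership branching by a frequency dict plus a count>=2 filter (A mutates nothing observable; equivalence is about the return value).
-- 'for key in d' iterates the dict's keys (first-occurrence order, unique): (PySem.Dict.ofList d).keys
def create_lists_with_keys (lst : List (List (String × Int))) : List String × List String :=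
  let st := lst.foldl (fun (st : List String × List String) d =>
    ((PySem.Dict.ofList d).keys).foldl (fun st key =>
      if key ∉ st.1 then (st.1 ++ [key], st.2)
      else if key ∉ st.2 then (st.1, st.2 ++ [key])
      else st) st) ([], [])
  (PySem.List.sorted st.1 (fun x => x), PySem.List.sorted st.2 (fun x => x))

-- ===== PORT B =====
def create_lists_with_keys_alt (lst : List (List (String × Int))) : List String × List String :=
  let counts := lst.foldl (fun (c : PySem.Dict String Int) d =>
    ((PySem.Dict.ofList d).keys).foldl (fun c key => c.insert key (c.getD key 0 + 1)) c)
    PySem.Dict.empty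
  (PySem.List.sorted counts.keys (fun x => x),
   PySem.List.sorted ((counts.items.filter (fun p => decide (2 ≤ p.2))).map Prod.fst) (fun x => x))

-- ===== PRECONDITION & SPEC =====
def Spec_create_lists_with_keys (lst : List (List (String × Int))) (out : List String × List String) : Prop := out = create_lists_with_keys_alt lst
instance (lst : List (List (String × Int))) (out : List String × List String) : Decidable (Spec_create_lists_with_keys lst out) := by unfold Spec_create_lists_with_keys; infer_instance

-- ===== CLAIM (what is proved, stated in full; the proofs are below) =====
def Claim_equal_create_lists_with_keys : Prop := ∀ (lst : List (List (String × Int))), Dom_create_lists_with_keys lst → Spec_create_lists_with_keys lst (create_lists_with_keys lst)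

-- ===== LEMMAS AND PROOFS =====

-- A's loop step on the flattened key stream
def pvStepA (st : List String × List String) (key : String) : List String × List String :=
  if key ∉ st.1 then (st.1 ++ [key], st.2)
  else if key ∉ st.2 then (st.1, st.2 ++ [key])
  else st

-- nested foldl over the dicts = foldl over the flattened key stream
theorem pv_foldl_flatMap {α β : Type} (l : List α) (f : α → List String) (g : β → String → β) (i : β) :
    (l.flatMap f).foldl g i = l.foldl (fun a x => (f x).foldl g a) i := by
  induction l generalizing i with
  | nil => rfl
  | cons x xs ih => simp [List.flatMap_cons, List.foldl_append, ih]

-- invariant of A's loop: distinct = keys seen at least once (nodup), duplicated = keys seen at least twice (nodup)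
theorem pvA_inv (ks : List String) :
    (ks.foldl pvStepA ([], [])).1.Nodup ∧
    (∀ k, k ∈ (ks.foldl pvStepA ([], [])).1 ↔ 1 ≤ ks.count k) ∧
    (ks.foldl pvStepA ([], [])).2.Nodup ∧
    (∀ k, k ∈ (ks.foldl pvStepA ([], [])).2 ↔ 2 ≤ ks.count k) := by
  induction ks using List.reverseRecOn with
  | nil => simp
  | append_singleton ks x ih =>
    obtain ⟨h1n, h1, h2n, h2⟩ := ih
    rw [List.foldl_append]
    simp only [List.foldl_cons, List.foldl_nil]
    generalize hg : ks.foldl pvStepA ([], []) = st at h1n h1 h2n h2 ⊢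
    obtain ⟨di, du⟩ := st
    simp only at h1n h1 h2n h2
    unfold pvStepA
    split_ifs with hx1 hx2 <;> dsimp only
    · -- x already in both lists: state unchanged
      have hc1 : 1 ≤ ks.count x := (h1 x).1 hx1
      have hc2 : 2 ≤ ks.count x := (h2 x).1 hx2
      refine ⟨h1n, ?_, h2n, ?_⟩
      · intro k
        simp only [List.count_append, List.count_singleton']
        rw [h1 k]
        by_cases hk : k = x
        · subst hk; rw [if_pos rfl]; omega
        · rw [if_neg (fun h => hk h.symm)]; omega
      · intro k
        simp only [List.count_append, List.count_singleton']
        rw [h2 k]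
        by_cases hk : k = x
        · subst hk; rw [if_pos rfl]; omega
        · rw [if_neg (fun h => hk h.symm)]; omega
    · -- second occurrence of x: appended to duplicated
      have hc1 : 1 ≤ ks.count x := (h1 x).1 hx1
      have hc2 : ¬ 2 ≤ ks.count x := fun h => hx2 ((h2 x).2 h)
      refine ⟨h1n, ?_, ?_, ?_⟩
      · intro k
        simp only [List.count_append, List.count_singleton']
        rw [h1 k]
        by_cases hk : k = x
        · subst hk; rw [if_pos rfl]; omega
        · rw [if_neg (fun h => hk h.symm)]; omega
      · exact List.Nodup.append h2n (List.nodup_singleton x)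
          (fun a ha hax => hx2 (List.mem_singleton.mp hax ▸ ha))
      · intro k
        simp only [List.mem_append, List.mem_singleton, List.count_append, List.count_singleton']
        rw [h2 k]
        by_cases hk : k = x
        · subst hk; rw [if_pos rfl]; simp only [or_true, true_iff]; omega
        · rw [if_neg (fun h => hk h.symm), or_iff_left hk]; omega
    · -- first occurrence of x: appended to distinct
      have hc : ks.count x = 0 := by
        by_contra h; exact hx1 ((h1 x).2 (by omega))
      refine ⟨?_, ?_, h2n, ?_⟩
      · exact List.Nodup.append h1n (List.nodup_singleton x)
          (fun a ha hax => hx1 (List.mem_singleton.mp hax ▸ ha))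
      · intro k
        simp only [List.mem_append, List.mem_singleton, List.count_append, List.count_singleton']
        rw [h1 k]
        by_cases hk : k = x
        · subst hk; rw [if_pos rfl]; simp only [or_true, true_iff]; omega
        · rw [if_neg (fun h => hk h.symm), or_iff_left hk]; omega
      · intro k
        simp only [List.count_append, List.count_singleton']
        rw [h2 k]
        by_cases hk : k = x
        · subst hk; rw [if_pos rfl]; omega
        · rw [if_neg (fun h => hk h.symm)]; omega

theorem create_lists_with_keys_spec : Claim_equal_create_lists_with_keys := by
  intro lst _
  unfold Spec_create_lists_with_keys create_lists_with_keys create_lists_with_keys_alt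
  have hA : lst.foldl (fun (st : List String × List String) d =>
      ((PySem.Dict.ofList d).keys).foldl (fun st key =>
        if key ∉ st.1 then (st.1 ++ [key], st.2)
        else if key ∉ st.2 then (st.1, st.2 ++ [key])
        else st) st) ([], [])
      = (lst.flatMap (fun d => (PySem.Dict.ofList d).keys)).foldl pvStepA ([], []) := by
    rw [pv_foldl_flatMap]; rfl
  have hB : lst.foldl (fun (c : PySem.Dict String Int) d =>
      ((PySem.Dict.ofList d).keys).foldl (fun c key => c.insert key (c.getD key 0 + 1)) c)
      PySem.Dict.empty
      = PySem.Dict.counter (lst.flatMap (fun d => (PySem.Dict.ofList d).keys)) := by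
    rw [← PySem.Dict.foldl_insert_getD_add_one_eq_counter, pv_foldl_flatMap]
  dsimp only
  rw [hA, hB]
  set ks := lst.flatMap (fun d => (PySem.Dict.ofList d).keys) with hks
  obtain ⟨h1n, h1, h2n, h2⟩ := pvA_inv ks
  set st := ks.foldl pvStepA ([], []) with hst
  have hinj : Function.Injective (fun x : String => x) := fun a b h => h
  have hfst : PySem.List.sorted st.1 (fun x => x)
      = PySem.List.sorted (PySem.Dict.counter ks).keys (fun x => x) := by
    apply PySem.List.sorted_eq_sorted_of_perm _ _ _ hinj
    rw [PySem.Dict.keys_counter]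
    rw [List.perm_ext_iff_of_nodup h1n (PySem.Set.nodup_ofList ks)]
    intro k
    rw [h1 k, PySem.Set.mem_ofList]
    exact ⟨fun h => List.count_pos_iff.mp (by omega),
           fun h => by have := List.count_pos_iff.mpr h; omega⟩
  have hsnd : PySem.List.sorted st.2 (fun x => x)
      = PySem.List.sorted
          (((PySem.Dict.counter ks).items.filter (fun p => decide (2 ≤ p.2))).map Prod.fst)
          (fun x => x) := by
    apply PySem.List.sorted_eq_sorted_of_perm _ _ _ hinj
    rw [PySem.Dict.items_counter, List.filter_map, List.map_map]
    have hid : (Prod.fst ∘ fun k : String => (k, (List.count k ks : Int))) = fun k => k := rfl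
    rw [hid, List.map_id']
    rw [List.perm_ext_iff_of_nodup h2n ((PySem.Set.nodup_ofList ks).filter _)]
    intro k
    rw [h2 k, List.mem_filter, PySem.Set.mem_ofList]
    simp only [Function.comp_apply, decide_eq_true_eq]
    constructor
    · intro h
      exact ⟨List.count_pos_iff.mp (by omega), by exact_mod_cast h⟩
    · rintro ⟨-, h⟩
      exact_mod_cast h
  rw [hfst, hsnd]
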